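-- pv_equiv track=rewrite | github.com/TugraBatin/Harmonbot | modules/utilities.py | duration_to_colon_format
-- ===== SOURCE A (Python) =====
-- def duration_to_colon_format(duration):
-- 	output = ""
-- 	started = False
-- 	for i in range(6):
-- 		if duration[i]:
-- 			started = True
-- 			output += str(duration[i]) + ":"
-- 		elif started:
-- 			output += "00:"
-- 	return output[:-1]
-- ===== SOURCE B (Python) =====
-- def duration_to_colon_format(duration):
--     start = next((i for i in range(6) if duration[i]), None)
--     if start is None:
--         return ""
--     return ":".join(str(duration[i]) if duration[i] else "00" for i in range(start, 6))
-- ===== Notes on version B (the rewrite author's own statement) =====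
-- stated objective: simpler
-- what changed: Replaces A's stateful accumulation loop (started flag, trailing-colon strip) by a find-first-truthy-index step followed by a map-and-join over the remaining indices.
import Mathlib
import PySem

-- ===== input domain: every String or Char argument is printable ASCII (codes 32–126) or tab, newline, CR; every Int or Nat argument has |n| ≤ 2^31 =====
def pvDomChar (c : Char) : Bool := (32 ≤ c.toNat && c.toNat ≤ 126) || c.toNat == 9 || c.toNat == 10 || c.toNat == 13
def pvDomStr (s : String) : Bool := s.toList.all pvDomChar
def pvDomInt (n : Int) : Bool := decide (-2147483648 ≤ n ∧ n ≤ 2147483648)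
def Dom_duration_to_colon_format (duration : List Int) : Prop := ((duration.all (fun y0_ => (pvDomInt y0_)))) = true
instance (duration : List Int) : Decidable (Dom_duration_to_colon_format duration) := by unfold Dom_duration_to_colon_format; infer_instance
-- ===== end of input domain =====

-- B replaces A's stateful accumulation loop (started flag + trailing-colon strip) by
-- find-first-truthy-index, then map-and-join of the remaining six-tuple entries.

-- ===== PORT A =====
-- stateful pass: (output, started); zeros after the first truthy entry emit "00:", trailing ":" stripped by [:-1]
def duration_to_colon_format (duration : List Int) : String :=
  let st := (PySem.List.pyRange 0 6 1).foldl
    (fun (st : String × Bool) i =>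
      let v := PySem.List.pyGetD duration i 0   -- duration[i]; total form, in range under Pre_
      if v ≠ 0 then (st.1 ++ PySem.Int.toStr v ++ ":", true)
      else if st.2 then (st.1 ++ "00:", st.2) else st)
    ("", false)
  PySem.Str.slice st.1 none (some (-1))

-- ===== PORT B =====
def duration_to_colon_format_alt (duration : List Int) : String :=
  match (PySem.List.pyRange 0 6 1).find? (fun i => PySem.List.pyGetD duration i 0 ≠ 0) with
  | none => ""
  | some start =>
      PySem.Str.join ":" ((PySem.List.pyRange start 6 1).map
        (fun i =>
          let v := PySem.List.pyGetD duration i 0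
          if v ≠ 0 then PySem.Int.toStr v else "00"))

-- ===== PRECONDITION & SPEC =====
-- Pre_: both programs index duration[0..5], so Python raises IndexError on lists shorter than 6.
def Pre_duration_to_colon_format (duration : List Int) : Prop := 6 ≤ duration.length
instance (duration : List Int) : Decidable (Pre_duration_to_colon_format duration) := by
  unfold Pre_duration_to_colon_format; infer_instance

def pvWitness_duration_to_colon_format : List Int := [0, 1, 0, 2, 30, 0]

def Spec_duration_to_colon_format (duration : List Int) (out : String) : Prop := out = duration_to_colon_format_alt duration
instance (duration : List Int) (out : String) : Decidable (Spec_duration_to_colon_format duration out) := by unfold Spec_duration_to_colon_format; infer_instance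

-- ===== CLAIM (what is proved, stated in full; the proofs are below) =====
def Claim_equal_duration_to_colon_format : Prop := ∀ (duration : List Int), Dom_duration_to_colon_format duration → Pre_duration_to_colon_format duration → Spec_duration_to_colon_format duration (duration_to_colon_format duration)

-- ===== LEMMAS AND PROOFS =====

-- specific to these programs: A's nonempty accumulator always ends in ':' and [:-1] strips exactly it
theorem slice_colon (L R : List Char) (h : L = R ++ [':']) :
    PySem.List.slice L none (some (-1)) = R := by
  rw [h, PySem.List.slice_to_neg_one, List.dropLast_concat]

-- duration[i] on a list with an explicit 6-prefix, one lemma per index used by the ports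
theorem G0 (x0 x1 x2 x3 x4 x5 : Int) (r : List Int) : PySem.List.pyGetD (x0::x1::x2::x3::x4::x5::r) 0 0 = x0 := by simp [pysem]
theorem G1 (x0 x1 x2 x3 x4 x5 : Int) (r : List Int) : PySem.List.pyGetD (x0::x1::x2::x3::x4::x5::r) 1 0 = x1 := by simp [pysem]
theorem G2 (x0 x1 x2 x3 x4 x5 : Int) (r : List Int) : PySem.List.pyGetD (x0::x1::x2::x3::x4::x5::r) 2 0 = x2 := by simp [pysem]
theorem G3 (x0 x1 x2 x3 x4 x5 : Int) (r : List Int) : PySem.List.pyGetD (x0::x1::x2::x3::x4::x5::r) 3 0 = x3 := by simp [pysem]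
theorem G4 (x0 x1 x2 x3 x4 x5 : Int) (r : List Int) : PySem.List.pyGetD (x0::x1::x2::x3::x4::x5::r) 4 0 = x4 := by simp [pysem]
theorem G5 (x0 x1 x2 x3 x4 x5 : Int) (r : List Int) : PySem.List.pyGetD (x0::x1::x2::x3::x4::x5::r) 5 0 = x5 := by simp [pysem]

-- the whole equivalence on a list with an explicit 6-prefix: case split on which entries are zero
theorem key (a b c d e f : Int) (rest : List Int) :
    duration_to_colon_format (a :: b :: c :: d :: e :: f :: rest)
      = duration_to_colon_format_alt (a :: b :: c :: d :: e :: f :: rest) := by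
  by_cases ha : a = 0 <;> by_cases hb : b = 0 <;> by_cases hc : c = 0 <;>
    by_cases hd : d = 0 <;> by_cases he : e = 0 <;> by_cases hf : f = 0 <;>
  (apply String.toList_inj.mp
   simp [duration_to_colon_format, duration_to_colon_format_alt,
     show PySem.List.pyRange 0 6 1 = [0,1,2,3,4,5] from by decide,
     show PySem.List.pyRange 1 6 1 = [1,2,3,4,5] from by decide,
     show PySem.List.pyRange 2 6 1 = [2,3,4,5] from by decide,
     show PySem.List.pyRange 3 6 1 = [3,4,5] from by decide,
     show PySem.List.pyRange 4 6 1 = [4,5] from by decide,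
     show PySem.List.pyRange 5 6 1 = [5] from by decide,
     G0, G1, G2, G3, G4, G5, ha, hb, hc, hd, he, hf,
     PySem.Str.toList_slice, PySem.Str.toList_join, PySem.Chars.join_cons_cons,
     PySem.Chars.join_singleton, PySem.Chars.join_nil, PySem.Int.toList_toStr,
     Function.comp]) <;>
  first
  | rfl
  | decide
  | exact slice_colon _ _ (by simp)

-- ===== VERDICT (by name: the statement is the Claim_ definition above) =====
theorem duration_to_colon_format_spec : Claim_equal_duration_to_colon_format := by
  intro duration _ hpre
  unfold Spec_duration_to_colon_format
  match duration, hpre with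
  | a :: b :: c :: d :: e :: f :: rest, _ => exact key a b c d e f rest
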